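-- pv_equiv track=rewrite | github.com/sskoldas/ROSALIND_PROBLEMS | bioinformatics_armory/SUBO.py | find_repeat_substring
-- ===== SOURCE A (Python) =====
-- def hamming_distance(sequence_1, sequence_2):                   #Hamming distance requires strings of equal length.
--     """
--     Compute Hamming distance by comparing each character in the two strings and counting the number of mismatches.
--     """
--     return sum([x != y for x, y in zip(sequence_1, sequence_2)])
--
-- def count_approaximate_matches(substring, sequence, max_edits=3):
--     """
--     Identify potential repeats and count number of matches allowing up to 3 variations.
--     """
--     count=0
--     length=len(substring)
--     for i in range(len(sequence) - length+1):
--         window=sequence[i:i+length]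
--         distance=hamming_distance(substring, window)
--         if distance <= max_edits:
--             count += 1
--     return count
--
-- def find_repeat_substring(substrings, s_sequence, t_sequence):
--     """
--     Identify the substring that occurs multiple times in both s and t with up to 3 variations.
--     """
--     max_total_occurence=0
--     repeat_substring=""
--     for substring in substrings:
--         s_count = count_approaximate_matches(substring, s_sequence)
--         t_count = count_approaximate_matches(substring, t_sequence)
--         if s_count > 1 and t_count > 0:
--             total_occurences = s_count + t_count
--             if total_occurences > max_total_occurence:
--                 max_total_occurence = total_occurences
--                 repeat_substring = substring
--     return repeat_substring
-- ===== SOURCE B (Python) =====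
-- def count_le3_matches(substring, sequence, max_edits=3):
--     """Column-wise match counting: accumulate per-window equal-position counts
--     one substring position at a time, then count windows with >= L - max_edits matches."""
--     L = len(substring)
--     m = len(sequence) - L + 1
--     if m <= 0:
--         return 0
--     matches = [0] * m
--     for j, c in enumerate(substring):
--         matches = [v + (sequence[i + j] == c) for i, v in enumerate(matches)]
--     return sum(1 for v in matches if v >= L - max_edits)
--
-- def find_repeat_substring(substrings, s_sequence, t_sequence):
--     candidates = []
--     for sub in substrings:
--         sc = count_le3_matches(sub, s_sequence)
--         if sc > 1:
--             tc = count_le3_matches(sub, t_sequence)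
--             if tc > 0:
--                 candidates.append((sc + tc, sub))
--     return max(candidates, key=lambda p: p[0], default=(0, ""))[1]
-- ===== Notes on version B (the rewrite author's own statement) =====
-- stated objective: alternative
-- what changed: Counting is transposed: instead of re-computing a Hamming distance for every window, B sweeps the substring once, accumulating per-window match counts column-wise in one array, then thresholds them; selection builds the qualifying (total, substring) candidate list and takes max(..., key=..., default=...) instead of a running best-so-far pair.
import Mathlib
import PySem

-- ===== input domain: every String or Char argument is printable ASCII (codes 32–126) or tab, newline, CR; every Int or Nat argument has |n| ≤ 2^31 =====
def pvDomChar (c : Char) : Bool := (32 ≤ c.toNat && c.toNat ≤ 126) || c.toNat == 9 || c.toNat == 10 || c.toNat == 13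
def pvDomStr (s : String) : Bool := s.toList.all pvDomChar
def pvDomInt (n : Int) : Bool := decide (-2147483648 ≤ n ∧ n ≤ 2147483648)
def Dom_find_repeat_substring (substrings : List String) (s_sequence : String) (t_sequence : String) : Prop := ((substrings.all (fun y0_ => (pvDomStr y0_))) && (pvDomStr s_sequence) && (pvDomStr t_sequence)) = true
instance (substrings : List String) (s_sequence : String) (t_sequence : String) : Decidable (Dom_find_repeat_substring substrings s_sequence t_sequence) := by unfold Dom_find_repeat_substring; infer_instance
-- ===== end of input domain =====

-- B transposes the per-window Hamming scan into one column-wise match-count sweep and picks the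
-- winner with a first-max over an explicit candidate list; same cost class, alternative structure.


-- ===== PORT A =====
-- hamming_distance: sum([x != y for x, y in zip(sequence_1, sequence_2)])
def pvHamming (sequence_1 sequence_2 : List Char) : Int :=
  ((sequence_1.zip sequence_2).map (fun p => if p.1 != p.2 then (1:Int) else 0)).sum

-- count_approaximate_matches(substring, sequence, max_edits=3)
def pvCountApprox (substring sequence : List Char) (max_edits : Int) : Int :=
  let length : Int := substring.length
  (PySem.List.pyRange 0 ((sequence.length : Int) - length + 1) 1).foldl
    (fun count i =>
      let window := PySem.List.slice sequence (some i) (some (i + length))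
      let distance := pvHamming substring window
      if distance ≤ max_edits then count + 1 else count) 0

def find_repeat_substring (substrings : List String) (s_sequence : String) (t_sequence : String) : String :=
  (substrings.foldl
    (fun st sub =>
      let s_count := pvCountApprox sub.toList s_sequence.toList 3
      let t_count := pvCountApprox sub.toList t_sequence.toList 3
      if s_count > 1 ∧ t_count > 0 then
        let total := s_count + t_count
        if total > st.1 then (total, sub) else st
      else st)
    ((0:Int), "")).2

-- ===== PORT B =====
-- count_le3_matches(substring, sequence, max_edits=3): column-wise accumulation of per-window
-- match counts (matches = [v + (sequence[i+j] == c) for i, v in enumerate(matches)]), then threshold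
def pvCountLe (substring sequence : List Char) (max_edits : Int) : Int :=
  let L : Int := substring.length
  let m : Int := (sequence.length : Int) - L + 1
  if m ≤ 0 then 0
  else
    let matchArr := (PySem.List.enumerate substring).foldl
      (fun ms jc =>
        (PySem.List.enumerate ms).map
          (fun iv => iv.2 + (if PySem.List.pyGetD sequence (iv.1 + jc.1) ' ' == jc.2 then (1:Int) else 0)))
      (List.replicate m.toNat (0:Int))
    ((matchArr.filter (fun v => decide (L - max_edits ≤ v))).length : Int)

-- candidate list + max(candidates, key=lambda p: p[0], default=(0, ""))[1]
def find_repeat_substring_alt (substrings : List String) (s_sequence : String) (t_sequence : String) : String :=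
  let candidates := substrings.foldl
    (fun acc sub =>
      let sc := pvCountLe sub.toList s_sequence.toList 3
      if sc > 1 then
        let tc := pvCountLe sub.toList t_sequence.toList 3
        if tc > 0 then acc ++ [(sc + tc, sub)] else acc
      else acc)
    ([] : List (Int × String))
  (PySem.List.maxD candidates (fun p => p.1) ((0:Int), "")).2

-- ===== PRECONDITION & SPEC =====
def Spec_find_repeat_substring (substrings : List String) (s_sequence : String) (t_sequence : String) (out : String) : Prop := out = find_repeat_substring_alt substrings s_sequence t_sequence
instance (substrings : List String) (s_sequence : String) (t_sequence : String) (out : String) : Decidable (Spec_find_repeat_substring substrings s_sequence t_sequence out) := by unfold Spec_find_repeat_substring; infer_instance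

-- ===== CLAIM (what is proved, stated in full; the proofs are below) =====
def Claim_equal_find_repeat_substring : Prop := ∀ (substrings : List String) (s_sequence : String) (t_sequence : String), Dom_find_repeat_substring substrings s_sequence t_sequence → Spec_find_repeat_substring substrings s_sequence t_sequence (find_repeat_substring substrings s_sequence t_sequence)

-- ===== LEMMAS AND PROOFS =====

-- enumerating a mapped range yields index-value pairs
theorem pv_enum_map_range {α : Type} :
    ∀ (M : Nat) (F : Nat → α) (s : Int), PySem.List.enumerate ((List.range M).map F) s
      = (List.range M).map (fun (k : Nat) => (s + (k : Int), F k)) := by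
  intro M
  induction M with
  | zero => intro F s; simp
  | succ n ih =>
    intro F s
    rw [List.range_succ_eq_map]
    simp only [List.map_cons, List.map_map, PySem.List.enumerate]
    rw [ih (F ∘ Nat.succ) (s + 1)]
    simp only [List.map_map, List.cons.injEq]
    refine ⟨by simp, ?_⟩
    apply List.map_congr_left
    intro k _
    simp only [Function.comp_apply, Prod.mk.injEq]
    exact ⟨by push_cast; ring, trivial⟩

-- shifting the start index of enumerate
theorem pv_enum_shift {α β : Type} (g : Int → α → β) :
    ∀ (xs : List α) (s t : Int),
      (PySem.List.enumerate xs s).map (fun jc => g (t + jc.1) jc.2)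
      = (PySem.List.enumerate xs (t + s)).map (fun jc => g jc.1 jc.2) := by
  intro xs
  induction xs with
  | nil => intro s t; simp [PySem.List.enumerate]
  | cons x xs ih =>
    intro s t
    simp only [PySem.List.enumerate, List.map_cons]
    rw [ih (s+1) t, show t + (s+1) = (t+s)+1 from by ring]

-- the column-wise fold of port B, characterised pointwise
theorem pv_foldB (seq : List Char) :
    ∀ (ps : List (Int × Char)) (M : Nat) (F : Nat → Int),
      ps.foldl
        (fun ms jc =>
          (PySem.List.enumerate ms).map
            (fun iv => iv.2 + (if PySem.List.pyGetD seq (iv.1 + jc.1) ' ' == jc.2 then (1:Int) else 0)))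
        ((List.range M).map F)
      = (List.range M).map
          (fun (k : Nat) => F k + (ps.map (fun jc => if PySem.List.pyGetD seq ((k : Int) + jc.1) ' ' == jc.2 then (1:Int) else 0)).sum) := by
  intro ps
  induction ps with
  | nil =>
    intro M F
    simp
  | cons jc ps ih =>
    intro M F
    simp only [List.foldl_cons]
    rw [pv_enum_map_range M F 0, List.map_map]
    rw [show ((fun iv => iv.2 + (if PySem.List.pyGetD seq (iv.1 + jc.1) ' ' == jc.2 then (1:Int) else 0)) ∘ (fun (k : Nat) => ((0:Int) + (k : Int), F k)))
        = (fun (k : Nat) => F k + (if PySem.List.pyGetD seq ((k:Int) + jc.1) ' ' == jc.2 then (1:Int) else 0)) from by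
      funext k; simp]
    rw [ih M _]
    apply List.map_congr_left
    intro k _
    simp only [List.map_cons, List.sum_cons]
    ring

-- the enumerate-sum counts matching positions of the window
theorem pv_esum :
    ∀ (sub seq : List Char) (k : Nat), k + sub.length ≤ seq.length →
      ((PySem.List.enumerate sub (k : Int)).map
        (fun jc => if PySem.List.pyGetD seq jc.1 ' ' == jc.2 then (1:Int) else 0)).sum
      = ((sub.zip (List.take sub.length (List.drop k seq))).countP (fun p => p.1 == p.2) : Int) := by
  intro sub
  induction sub with
  | nil => intro seq k h; simp [PySem.List.enumerate]
  | cons c rest ih =>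
    intro seq k h
    simp only [List.length_cons] at h
    have hk : k < seq.length := by omega
    simp only [PySem.List.enumerate, List.map_cons, List.sum_cons, List.length_cons]
    rw [show ((k:Int) + 1) = ((k+1 : Nat) : Int) from by push_cast; ring]
    rw [ih seq (k+1) (by omega)]
    rw [List.drop_eq_getElem_cons hk]
    rw [List.take_succ_cons, List.zip_cons_cons, List.countP_cons]
    rw [PySem.List.pyGetD_natCast, List.getD_eq_getElem seq ' ' hk]
    by_cases hc : seq[k] = c
    · simp [hc]; ring
    · have h1 : (seq[k] == c) = false := by simpa using hc
      have h2 : (c == seq[k]) = false := by simpa using (Ne.symm hc)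
      simp [h1, h2]

-- matches and mismatches partition a zipped window
theorem pv_zip_counts (sub w : List Char) :
    (sub.zip w).length = (sub.zip w).countP (fun p => p.1 == p.2) + (sub.zip w).countP (fun p => p.1 != p.2) := by
  rw [List.length_eq_countP_add_countP (l := sub.zip w) (p := fun p => p.1 == p.2)]
  congr 1
  apply List.countP_congr
  intro a _
  simp [bne]

-- the two counting routines agree
theorem pv_count_eq (sub seq : List Char) :
    pvCountApprox sub seq 3 = pvCountLe sub seq 3 := by
  unfold pvCountApprox pvCountLe
  simp only []
  set L : Int := (sub.length : Int) with hL
  set mI : Int := (seq.length : Int) - L + 1 with hm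
  by_cases hpos : mI ≤ 0
  · have h1 : ¬ ((0:Int) < mI) := by omega
    rw [if_pos hpos]
    simp [PySem.List.pyRange, h1]
  · rw [if_neg hpos]
    have hLn : sub.length ≤ seq.length := by omega
    set M : Nat := mI.toNat with hM
    have hMI : (M : Int) = mI := Int.toNat_of_nonneg (by omega)
    have hbody : (fun (count : Int) (i : Int) =>
        if pvHamming sub (PySem.List.slice seq (some i) (some (i + L))) ≤ 3 then count + 1 else count)
        = (fun (count : Int) (i : Int) =>
        if (fun i => decide (pvHamming sub (PySem.List.slice seq (some i) (some (i + L))) ≤ 3)) i = true then count + 1 else count) := by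
      funext c i; simp
    rw [hbody, PySem.List.foldl_count_if, ← hMI, PySem.List.pyRange_zero_natCast, List.countP_map]
    rw [show List.replicate M (0:Int) = (List.range M).map (fun _ => (0:Int)) from by simp]
    rw [pv_foldB seq (PySem.List.enumerate sub 0) M (fun _ => 0)]
    rw [← List.countP_eq_length_filter, List.countP_map]
    simp only [zero_add]
    congr 1
    apply List.countP_congr
    intro k hk
    have hkM : k < M := List.mem_range.mp hk
    have hkL : k + sub.length ≤ seq.length := by omega
    have hcast : (k : Int) + L = ((k + sub.length : Nat) : Int) := by push_cast; ring
    rw [Function.comp_apply, Function.comp_apply, hcast, PySem.List.slice_natCast seq k (k + sub.length)]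
    rw [show k + sub.length - k = sub.length from by omega]
    have hham : pvHamming sub (List.take sub.length (List.drop k seq))
        = ((sub.zip (List.take sub.length (List.drop k seq))).countP (fun p => p.1 != p.2) : Int) := by
      unfold pvHamming
      exact PySem.List.sum_map_ite_one_zero _ _
    have hesum : ((PySem.List.enumerate sub 0).map
        (fun jc => if PySem.List.pyGetD seq ((k:Int) + jc.1) ' ' == jc.2 then (1:Int) else 0)).sum
        = ((sub.zip (List.take sub.length (List.drop k seq))).countP (fun p => p.1 == p.2) : Int) := by
      rw [pv_enum_shift (fun i c => if PySem.List.pyGetD seq i ' ' == c then (1:Int) else 0) sub 0 (k:Int)]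
      rw [show (k:Int) + 0 = (k:Int) from by ring]
      exact pv_esum sub seq k hkL
    rw [hham, hesum]
    have hlen : (sub.zip (List.take sub.length (List.drop k seq))).length = sub.length := by
      rw [List.length_zip, List.length_take, List.length_drop]
      omega
    have := pv_zip_counts sub (List.take sub.length (List.drop k seq))
    rw [hlen] at this
    simp only [decide_eq_true_eq]
    omega

-- the candidate one substring contributes in B
def pvCand (s_sequence t_sequence : String) (sub : String) : Option (Int × String) :=
  let sc := pvCountLe sub.toList s_sequence.toList 3
  let tc := pvCountLe sub.toList t_sequence.toList 3
  if sc > 1 ∧ tc > 0 then some (sc + tc, sub) else none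

theorem pv_cands_eq (s_sequence t_sequence : String) :
    ∀ (l : List String) (acc : List (Int × String)),
      l.foldl
        (fun acc sub =>
          let sc := pvCountLe sub.toList s_sequence.toList 3
          if sc > 1 then
            let tc := pvCountLe sub.toList t_sequence.toList 3
            if tc > 0 then acc ++ [(sc + tc, sub)] else acc
          else acc) acc
      = acc ++ l.filterMap (pvCand s_sequence t_sequence) := by
  intro l
  induction l with
  | nil => intro acc; simp
  | cons sub l ih =>
    intro acc
    simp only [List.foldl_cons, List.filterMap_cons]
    by_cases h1 : pvCountLe sub.toList s_sequence.toList 3 > 1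
    · by_cases h2 : pvCountLe sub.toList t_sequence.toList 3 > 0
      · have hc : pvCand s_sequence t_sequence sub
            = some (pvCountLe sub.toList s_sequence.toList 3 + pvCountLe sub.toList t_sequence.toList 3, sub) := by
          unfold pvCand; simp only []; rw [if_pos ⟨h1, h2⟩]
        rw [hc]
        simp only [if_pos h1, if_pos h2, ih]
        simp
      · have hc : pvCand s_sequence t_sequence sub = none := by
          unfold pvCand; simp only []; rw [if_neg (by tauto)]
        rw [hc]
        simp only [if_pos h1, if_neg h2, ih]
    · have hc : pvCand s_sequence t_sequence sub = none := by
        unfold pvCand; simp only []; rw [if_neg (by tauto)]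
      rw [hc]
      simp only [if_neg h1, ih]

-- Python's first-max rule, one comparison at a time
theorem pv_max_cons_cons {α : Type} (key : α → Int) (a b : α) (xs : List α) :
    PySem.List.max? (a :: b :: xs) key = PySem.List.max? ((if key a < key b then b else a) :: xs) key := by
  by_cases h : key a < key b
  · simp [PySem.List.max?, h]
  · simp [PySem.List.max?, h]

-- A's running best over the substrings is the first max over B's candidate list (seeded with st)
theorem pv_foldA_eq (s_sequence t_sequence : String) :
    ∀ (l : List String) (st : Int × String),
      PySem.List.max? (st :: l.filterMap (pvCand s_sequence t_sequence)) (fun p => p.1)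
      = some (l.foldl
          (fun st sub =>
            let s_count := pvCountApprox sub.toList s_sequence.toList 3
            let t_count := pvCountApprox sub.toList t_sequence.toList 3
            if s_count > 1 ∧ t_count > 0 then
              let total := s_count + t_count
              if total > st.1 then (total, sub) else st
            else st) st) := by
  intro l
  induction l with
  | nil => intro st; simp [PySem.List.max?]
  | cons sub l ih =>
    intro st
    simp only [List.filterMap_cons, List.foldl_cons, pv_count_eq]
    by_cases h : pvCountLe sub.toList s_sequence.toList 3 > 1 ∧ pvCountLe sub.toList t_sequence.toList 3 > 0
    · have hc : pvCand s_sequence t_sequence sub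
          = some (pvCountLe sub.toList s_sequence.toList 3 + pvCountLe sub.toList t_sequence.toList 3, sub) := by
        unfold pvCand; simp only []; rw [if_pos h]
      rw [hc]
      rw [pv_max_cons_cons (fun p => p.1) st _ _]
      by_cases h2 : st.1 < pvCountLe sub.toList s_sequence.toList 3 + pvCountLe sub.toList t_sequence.toList 3
      · rw [if_pos h2]
        simp only [h.1, h.2, h2, and_self, if_true, gt_iff_lt]
        simpa only [pv_count_eq] using ih _
      · rw [if_neg h2]
        simp only [h.1, h.2, h2, and_self, if_true, if_false, gt_iff_lt, ite_false]
        simpa only [pv_count_eq] using ih st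
    · have hc : pvCand s_sequence t_sequence sub = none := by
        unfold pvCand; simp only []; rw [if_neg h]
      rw [hc]
      rw [if_neg (by simpa [gt_iff_lt] using h)]
      simpa only [pv_count_eq] using ih st

-- every candidate's total is positive (s_count > 1, t_count > 0)
theorem pv_cand_pos (s_sequence t_sequence : String) (sub : String) (c : Int × String)
    (h : pvCand s_sequence t_sequence sub = some c) : 0 < c.1 := by
  unfold pvCand at h
  simp only [] at h
  by_cases hc : pvCountLe sub.toList s_sequence.toList 3 > 1 ∧ pvCountLe sub.toList t_sequence.toList 3 > 0
  · rw [if_pos hc] at h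
    cases h
    simp only []
    omega
  · rw [if_neg hc] at h
    cases h

theorem pv_main_eq (substrings : List String) (s_sequence : String) (t_sequence : String) :
    find_repeat_substring substrings s_sequence t_sequence
      = find_repeat_substring_alt substrings s_sequence t_sequence := by
  unfold find_repeat_substring find_repeat_substring_alt PySem.List.maxD
  simp only []
  rw [pv_cands_eq s_sequence t_sequence substrings ([] : List (Int × String)), List.nil_append]
  have hA := pv_foldA_eq s_sequence t_sequence substrings ((0:Int), "")
  cases hcands : (substrings.filterMap (pvCand s_sequence t_sequence)) with
  | nil =>
    rw [hcands] at hA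
    have h1 : PySem.List.max? [((0:Int), "")] (fun p : Int × String => p.1) = some ((0:Int), "") := by
      simp [PySem.List.max?]
    rw [h1] at hA
    simp only [List.foldl_nil] at hA ⊢
    rw [← Option.some_inj.mp hA]
    simp [PySem.List.max?]
  | cons c rest =>
    rw [hcands] at hA
    have hmem : c ∈ substrings.filterMap (pvCand s_sequence t_sequence) := by
      rw [hcands]; exact List.mem_cons_self
    obtain ⟨sub, _, hsub⟩ := List.mem_filterMap.mp hmem
    have hc1 : 0 < c.1 := pv_cand_pos s_sequence t_sequence sub c hsub
    rw [pv_max_cons_cons (fun p => p.1) ((0:Int), "") c rest] at hA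
    rw [if_pos hc1] at hA
    rw [hA, Option.getD_some]

-- ===== VERDICT (by name: the statement is the Claim_ definition above) =====
theorem find_repeat_substring_spec : Claim_equal_find_repeat_substring := by
  intro substrings s_sequence t_sequence _
  unfold Spec_find_repeat_substring
  exact pv_main_eq substrings s_sequence t_sequence
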